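-- pv_equiv track=rewrite | github.com/fovalioglu/urun-takip-sistemi | app.py | dedupe_atolye_names
-- ===== SOURCE A (Python) =====
-- def dedupe_atolye_names(names: list[str]) -> list[str]:
--     seen: dict[str, str] = {}
--     for n in names:
--         s = str(n).strip()
--         if not s:
--             continue
--         k = s.casefold()
--         if k not in seen:
--             seen[k] = s
--     return sorted(seen.values(), key=lambda x: x.casefold())
-- ===== SOURCE B (Python) =====
-- def dedupe_atolye_names(names: list[str]) -> list[str]:
--     remaining = [s for s in (str(n).strip() for n in names) if s]
--     out = []
--     while remaining:
--         best = min(remaining, key=str.casefold)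
--         k = best.casefold()
--         out.append(best)
--         remaining = [s for s in remaining if s.casefold() != k]
--     return out
-- ===== Notes on version B (the rewrite author's own statement) =====
-- stated objective: alternative
-- what changed: Replaces A's first-wins dict dedup followed by a library sort with repeated minimum extraction: pick the casefold-least remaining string (min with key=str.casefold, which keeps the first occurrence on ties) and drop its whole casefold class, so no dict and no sort are used.
import Mathlib
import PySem

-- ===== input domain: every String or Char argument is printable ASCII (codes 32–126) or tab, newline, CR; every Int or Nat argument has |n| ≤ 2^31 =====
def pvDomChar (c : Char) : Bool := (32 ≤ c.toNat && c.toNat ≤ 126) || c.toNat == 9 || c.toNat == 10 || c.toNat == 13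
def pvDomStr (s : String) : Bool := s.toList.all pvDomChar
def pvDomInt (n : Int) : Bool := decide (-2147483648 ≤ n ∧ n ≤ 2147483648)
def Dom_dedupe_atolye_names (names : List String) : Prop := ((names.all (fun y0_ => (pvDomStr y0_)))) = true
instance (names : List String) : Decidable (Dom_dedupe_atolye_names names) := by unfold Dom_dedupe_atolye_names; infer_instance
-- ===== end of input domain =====

-- B replaces A's dict-dedup-then-library-sort by repeated minimum extraction (pick the casefold-least
-- remaining string, drop its whole casefold class); alternative algorithm, similar cost on these sizes.
-- casefold is ported as PySem.Str.lower, exact on the ASCII domain Dom.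

-- ===== PORT A =====
def dedupe_atolye_names (names : List String) : List String :=
  let seen : PySem.Dict String String := names.foldl (fun d n =>
    let s := PySem.Str.strip n
    if s == "" then d
    else
      let k := PySem.Str.lower s
      if d.contains k then d else d.insert k s) PySem.Dict.empty
  PySem.List.sorted seen.values (fun x => PySem.Str.lower x)

-- ===== PORT B =====
def pvClean (names : List String) : List String :=
  names.filterMap (fun n => let s := PySem.Str.strip n; if s == "" then none else some s)

def pvPick (L : List String) : List String :=
  match h : PySem.List.min? L (fun s => PySem.Str.lower s) with
  | none => []
  | some best =>
      best :: pvPick (L.filter (fun s => !(PySem.Str.lower s == PySem.Str.lower best)))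
termination_by L.length
decreasing_by
  have hb : best ∈ L := PySem.List.min?_mem h
  have hlt : (L.attach.filter (fun x => !(PySem.Str.lower x.1 == PySem.Str.lower best))).length < L.attach.length :=
    List.length_filter_lt_length_iff_exists.mpr ⟨⟨best, hb⟩, List.mem_attach _ _, by simp⟩
  simpa using hlt

def dedupe_atolye_names_alt (names : List String) : List String :=
  pvPick (pvClean names)

-- ===== PRECONDITION & SPEC =====
def Spec_dedupe_atolye_names (names : List String) (out : List String) : Prop := out = dedupe_atolye_names_alt names
instance (names : List String) (out : List String) : Decidable (Spec_dedupe_atolye_names names out) := by unfold Spec_dedupe_atolye_names; infer_instance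

-- ===== CLAIM (what is proved, stated in full; the proofs are below) =====
def Claim_equal_dedupe_atolye_names : Prop := ∀ (names : List String), Dom_dedupe_atolye_names names → Spec_dedupe_atolye_names names (dedupe_atolye_names names)


-- ===== LEMMAS AND PROOFS =====

-- the pure dict-building step of A after stripping/skipping has been done
def pvStepC (d : PySem.Dict String String) (s : String) : PySem.Dict String String :=
  if d.contains (PySem.Str.lower s) then d else d.insert (PySem.Str.lower s) s

-- first occurrence of every casefold class, in first-occurrence order (A's dict values)
def pvDedupF : List String → List String
  | [] => []
  | x :: xs => x :: pvDedupF (xs.filter (fun y => !(PySem.Str.lower y == PySem.Str.lower x)))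
termination_by l => l.length
decreasing_by
  simp only [List.length_unattach, List.length_cons]
  exact Nat.lt_succ_of_le (le_trans (List.length_filter_le _ _) (by simp))

lemma pv_mem_dedupF {y : String} : ∀ {l : List String}, y ∈ pvDedupF l → y ∈ l := by
  intro l
  induction l using pvDedupF.induct with
  | case1 => intro h; simp [pvDedupF] at h
  | case2 x xs ih =>
      simp only [List.unattach_filter, List.unattach_attach] at ih ⊢
      intro h
      simp only [pvDedupF] at h
      rcases List.mem_cons.mp h with h | h
      · exact h ▸ List.mem_cons_self ..
      · exact List.mem_cons_of_mem _ (List.mem_of_mem_filter (ih (by simpa using h)))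

lemma pv_dedupF_keys : ∀ (l : List String),
    (pvDedupF l).Pairwise (fun a b => PySem.Str.lower a ≠ PySem.Str.lower b) := by
  intro l
  induction l using pvDedupF.induct with
  | case1 => simp [pvDedupF]
  | case2 x xs ih =>
      simp only [pvDedupF]
      simp only [List.unattach_filter, List.unattach_attach] at ih
      refine List.Pairwise.cons (fun b hb => ?_) (by simpa using ih)
      have hb' := pv_mem_dedupF hb
      have hf := List.of_mem_filter hb'
      simp only [Bool.not_eq_true', beq_eq_false_iff_ne] at hf
      exact fun h => hf h.symm

lemma pv_dedupF_filter (k : String) : ∀ (l : List String),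
    pvDedupF (l.filter (fun y => !(PySem.Str.lower y == k)))
      = (pvDedupF l).filter (fun y => !(PySem.Str.lower y == k)) := by
  intro l
  induction l using pvDedupF.induct with
  | case1 => simp [pvDedupF]
  | case2 x xs ih =>
      simp only [List.unattach_filter, List.unattach_attach] at ih
      by_cases hk : PySem.Str.lower x = k
      · rw [← hk]
        have hxk : (!(PySem.Str.lower x == PySem.Str.lower x)) = false := by simp
        rw [List.filter_cons, hxk]
        conv_rhs => rw [pvDedupF]
        rw [List.filter_cons, hxk]
        simp only [Bool.false_eq_true, if_false]
        refine ((List.filter_eq_self.mpr ?_).symm)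
        intro a ha
        exact List.of_mem_filter (p := fun y => !(PySem.Str.lower y == PySem.Str.lower x)) (pv_mem_dedupF ha)
      · have hkb : (!(PySem.Str.lower x == k)) = true := by
          simpa using hk
        rw [List.filter_cons, if_pos hkb]
        conv_lhs => rw [pvDedupF]
        conv_rhs => rw [pvDedupF]
        rw [List.filter_cons, if_pos hkb]
        congr 1
        rw [← ih, List.filter_filter, List.filter_filter]
        congr 1
        apply List.filter_congr
        intro a _
        exact Bool.and_comm _ _

lemma pv_first_mem : ∀ (n : ℕ) (p t : List String) (r : String), p.length ≤ n →
    (∀ y ∈ p, PySem.Str.lower y ≠ PySem.Str.lower r) → r ∈ pvDedupF (p ++ r :: t) := by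
  intro n
  induction n with
  | zero =>
      intro p t r hlen _
      have hp : p = [] := List.eq_nil_of_length_eq_zero (Nat.le_zero.mp hlen)
      subst hp
      simp only [List.nil_append, pvDedupF]
      exact List.mem_cons_self ..
  | succ n ih =>
      intro p t r hlen hp
      cases p with
      | nil =>
          simp only [List.nil_append, pvDedupF]
          exact List.mem_cons_self ..
      | cons y p' =>
          simp only [List.cons_append, pvDedupF]
          have hyr : PySem.Str.lower y ≠ PySem.Str.lower r := hp y (List.mem_cons_self ..)
          have hsplit : (p' ++ r :: t).filter (fun z => !(PySem.Str.lower z == PySem.Str.lower y))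
              = (p'.filter (fun z => !(PySem.Str.lower z == PySem.Str.lower y)))
                ++ r :: (t.filter (fun z => !(PySem.Str.lower z == PySem.Str.lower y))) := by
            rw [List.filter_append, List.filter_cons]
            have : (!(PySem.Str.lower r == PySem.Str.lower y)) = true := by
              simpa using fun h => hyr h.symm
            rw [if_pos this]
          rw [hsplit]
          refine List.mem_cons_of_mem _ (ih _ _ _ ?_ ?_)
          · have h1 := List.length_filter_le (fun z => !(PySem.Str.lower z == PySem.Str.lower y)) p'
            have h2 : p'.length ≤ n := by simpa using Nat.succ_le_succ_iff.mp (by simpa using hlen)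
            omega
          · intro z hz
            exact hp z (List.mem_cons_of_mem _ (List.mem_of_mem_filter hz))

lemma pv_perm_cons_filter : ∀ (l : List String) (r : String),
    l.Pairwise (fun a b => PySem.Str.lower a ≠ PySem.Str.lower b) → r ∈ l →
    l.Perm (r :: l.filter (fun y => !(PySem.Str.lower y == PySem.Str.lower r))) := by
  intro l
  induction l with
  | nil => intro r _ h; simp at h
  | cons y ys ih =>
      intro r hpw hr
      have hpw' := List.pairwise_cons.mp hpw
      by_cases hy : y = r
      · subst hy
        have hys : ys.filter (fun z => !(PySem.Str.lower z == PySem.Str.lower y)) = ys :=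
          List.filter_eq_self.mpr (fun a ha => by
            simp only [Bool.not_eq_true', beq_eq_false_iff_ne]
            exact fun h => hpw'.1 a ha h.symm)
        have hyk : (!(PySem.Str.lower y == PySem.Str.lower y)) = false := by simp
        rw [List.filter_cons]
        simp only [hyk, Bool.false_eq_true, if_false, hys]
        exact List.Perm.refl _
      · have hr' : r ∈ ys := by
          rcases List.mem_cons.mp hr with h | h
          · exact absurd h.symm hy
          · exact h
        have hkeep : (!(PySem.Str.lower y == PySem.Str.lower r)) = true := by
          simpa using hpw'.1 r hr'
        rw [List.filter_cons, if_pos hkeep]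
        exact (List.Perm.cons y (ih r hpw'.2 hr')).trans (List.Perm.swap r y _)

lemma pv_min_cons_cons (m x : String) (xs : List String) :
    PySem.List.min? (m :: x :: xs) (fun s => PySem.Str.lower s)
      = PySem.List.min? ((if PySem.Str.lower x < PySem.Str.lower m then x else m) :: xs)
          (fun s => PySem.Str.lower s) := by
  simp only [PySem.List.min?, List.foldl_cons]
  by_cases h : PySem.Str.lower x < PySem.Str.lower m <;> simp [h]

lemma pv_min_one (m : String) : PySem.List.min? [m] (fun s => PySem.Str.lower s) = some m := by
  simp [PySem.List.min?]

lemma pv_min_aux : ∀ (xs : List String) (m r : String),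
    PySem.List.min? (m :: xs) (fun s => PySem.Str.lower s) = some r →
    (r = m ∧ ∀ y ∈ xs, PySem.Str.lower m ≤ PySem.Str.lower y) ∨
    (∃ p t, xs = p ++ r :: t ∧ PySem.Str.lower r < PySem.Str.lower m ∧
      ∀ y ∈ p, PySem.Str.lower r < PySem.Str.lower y) := by
  intro xs
  induction xs with
  | nil =>
      intro m r h
      rw [pv_min_one] at h
      exact Or.inl ⟨(Option.some.injEq ..▸ h).symm, by simp⟩
  | cons x xs ih =>
      intro m r h
      rw [pv_min_cons_cons] at h
      by_cases hx : PySem.Str.lower x < PySem.Str.lower m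
      · rw [if_pos hx] at h
        rcases ih x r h with ⟨hrx, hall⟩ | ⟨p, t, heq, hlt, hp⟩
        · subst hrx
          exact Or.inr ⟨[], xs, by simp, hx, by simp⟩
        · refine Or.inr ⟨x :: p, t, by rw [heq, List.cons_append], lt_trans hlt hx, ?_⟩
          intro z hz
          rcases List.mem_cons.mp hz with h' | h'
          · exact h' ▸ hlt
          · exact hp z h'
      · rw [if_neg hx] at h
        rcases ih m r h with ⟨hrm, hall⟩ | ⟨p, t, heq, hlt, hp⟩
        · refine Or.inl ⟨hrm, fun z hz => ?_⟩
          rcases List.mem_cons.mp hz with h' | h'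
          · exact h' ▸ not_lt.mp hx
          · exact hall z h'
        · refine Or.inr ⟨x :: p, t, by rw [heq, List.cons_append], hlt, ?_⟩
          intro z hz
          rcases List.mem_cons.mp hz with h' | h'
          · exact h' ▸ lt_of_lt_of_le hlt (not_lt.mp hx)
          · exact hp z h'

lemma pv_min_split {L : List String} {r : String}
    (h : PySem.List.min? L (fun s => PySem.Str.lower s) = some r) :
    ∃ p t, L = p ++ r :: t ∧ ∀ y ∈ p, PySem.Str.lower r < PySem.Str.lower y := by
  cases L with
  | nil => simp [PySem.List.min?] at h
  | cons x xs =>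
      rcases pv_min_aux xs x r h with ⟨hrx, _⟩ | ⟨p, t, heq, hlt, hp⟩
      · exact ⟨[], xs, by simp [hrx], by simp⟩
      · refine ⟨x :: p, t, by rw [heq, List.cons_append], ?_⟩
        intro z hz
        rcases List.mem_cons.mp hz with h'' | h''
        · exact h'' ▸ hlt
        · exact hp z h''

lemma pv_mem_pick {y : String} : ∀ {l : List String}, y ∈ pvPick l → y ∈ l := by
  intro l
  induction l using pvPick.induct with
  | case1 l h => intro hy; rw [pvPick, h] at hy; simp at hy
  | case2 l best h ih =>
      simp only [List.unattach_filter, List.unattach_attach] at ih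
      intro hy
      rw [pvPick, h] at hy
      rcases List.mem_cons.mp hy with h' | h'
      · exact h' ▸ PySem.List.min?_mem h
      · exact List.mem_of_mem_filter (ih (by simpa using h'))

lemma pv_pick_pairwise : ∀ (l : List String),
    (pvPick l).Pairwise (fun a b => PySem.Str.lower a < PySem.Str.lower b) := by
  intro l
  induction l using pvPick.induct with
  | case1 l h => rw [pvPick, h]; simp
  | case2 l best h ih =>
      simp only [List.unattach_filter, List.unattach_attach] at ih
      rw [pvPick, h]
      refine List.Pairwise.cons (fun b hb => ?_) (by simpa using ih)
      have hbl := pv_mem_pick hb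
      have hne := List.of_mem_filter hbl
      simp only [Bool.not_eq_true', beq_eq_false_iff_ne] at hne
      have hle := PySem.List.min?_isMin h b (List.mem_of_mem_filter hbl)
      exact lt_of_le_of_ne hle (fun hh => hne hh.symm)

lemma pv_pick_perm : ∀ (l : List String), (pvPick l).Perm (pvDedupF l) := by
  intro l
  induction l using pvPick.induct with
  | case1 l h =>
      rw [pvPick, h]
      rw [PySem.List.min?_eq_none_iff] at h
      subst h
      simp [pvDedupF]
  | case2 l best h ih =>
      simp only [List.unattach_filter, List.unattach_attach] at ih
      rw [pvPick, h]
      rcases pv_min_split h with ⟨p, t, heq, hp⟩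
      have hmem : best ∈ pvDedupF l := by
        rw [heq]
        exact pv_first_mem p.length p t best le_rfl
          (fun y hy => (ne_of_lt (hp y hy)).symm)
      have hperm := pv_perm_cons_filter (pvDedupF l) best (pv_dedupF_keys l) hmem
      refine List.Perm.trans (List.Perm.cons best ?_) hperm.symm
      rw [pv_dedupF_filter (PySem.Str.lower best) l] at ih
      exact ih

lemma pv_foldl_clean : ∀ (names : List String) (d : PySem.Dict String String),
    names.foldl (fun d n =>
      let s := PySem.Str.strip n
      if s == "" then d
      else
        let k := PySem.Str.lower s
        if d.contains k then d else d.insert k s) d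
    = (pvClean names).foldl pvStepC d := by
  intro names
  induction names with
  | nil => intro d; simp [pvClean]
  | cons n ns ih =>
      intro d
      by_cases hs : PySem.Str.strip n == ""
      · simp only [List.foldl_cons, pvClean, List.filterMap_cons, hs, if_pos]
        simpa [pvClean, hs] using ih d
      · simp only [List.foldl_cons, pvClean, List.filterMap_cons]
        rw [if_neg (by simpa using hs)]
        simp only [hs, Bool.false_eq_true, if_false, List.foldl_cons]
        simpa [pvClean, pvStepC] using ih _

lemma pv_values_insert_new {d : PySem.Dict String String} {k v : String}
    (hc : d.contains k = false) : (d.insert k v).values = d.values ++ [v] := by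
  simp [PySem.Dict.insert, hc, PySem.Dict.values]

lemma pv_contains_insert {d : PySem.Dict String String} {k v k' : String}
    (hc : d.contains k = false) :
    (d.insert k v).contains k' = (d.contains k' || (k == k')) := by
  have hc2 : (d.items.any fun p => p.1 == k) = false := hc
  simp [PySem.Dict.insert, PySem.Dict.contains, hc2, List.any_append]

lemma pv_values_build : ∀ (L : List String) (d : PySem.Dict String String),
    (L.foldl pvStepC d).values
      = d.values ++ pvDedupF (L.filter (fun s => !(d.contains (PySem.Str.lower s)))) := by
  intro L
  induction L with
  | nil => intro d; simp [pvDedupF]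
  | cons x xs ih =>
      intro d
      by_cases hc : d.contains (PySem.Str.lower x)
      · rw [List.foldl_cons]
        rw [show pvStepC d x = d from by simp [pvStepC, hc]]
        rw [List.filter_cons]
        rw [show (!(d.contains (PySem.Str.lower x))) = false from by simp [hc]]
        simp only [Bool.false_eq_true, if_false]
        exact ih d
      · have hc' : d.contains (PySem.Str.lower x) = false := by simpa using hc
        rw [List.foldl_cons]
        rw [show pvStepC d x = d.insert (PySem.Str.lower x) x from by simp [pvStepC, hc']]
        rw [List.filter_cons]
        rw [show (!(d.contains (PySem.Str.lower x))) = true from by simp [hc']]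
        simp only [if_true]
        rw [ih, pv_values_insert_new hc']
        simp only [pvDedupF]
        rw [List.append_assoc, List.singleton_append]
        congr 2
        rw [List.filter_filter]
        congr 1
        apply List.filter_congr
        intro a _
        rw [pv_contains_insert hc']
        simp only [Bool.not_or]
        rw [Bool.and_comm]
        congr 1
        rw [Bool.beq_comm]

-- ===== VERDICT (by name: the statement is the Claim_ definition above) =====
theorem dedupe_atolye_names_spec : Claim_equal_dedupe_atolye_names := by
  intro names _
  unfold Spec_dedupe_atolye_names dedupe_atolye_names dedupe_atolye_names_alt
  rw [pv_foldl_clean]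
  show PySem.List.sorted (List.foldl pvStepC PySem.Dict.empty (pvClean names)).values
      (fun x => PySem.Str.lower x) = pvPick (pvClean names)
  rw [pv_values_build]
  have hempty : (PySem.Dict.empty : PySem.Dict String String).values = [] := rfl
  rw [hempty, List.nil_append]
  rw [List.filter_eq_self.mpr (by intro a _; simp [PySem.Dict.empty, PySem.Dict.contains])]
  exact PySem.List.sorted_eq_of_perm_of_pairwise_lt _ _ _ (pv_pick_perm _) (pv_pick_pairwise _)
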